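-- pv_equiv track=rewrite | github.com/Aethernal/AdventOfCode | 2020/04/main.py | parsePassports
-- ===== SOURCE A (Python) =====
-- def parsePassports(inputs):
--     passports = []
--     current = {}
--
--     for line in inputs:
--         if(line == "\n"):
--             passports.append(current)
--             current = {}
--             continue
--         for param in line.split(" "):
--             current.update({param.split(":")[0]: param.split(":")[1].strip()})
--
--     passports.append(current)
--     return passports
-- ===== SOURCE B (Python) =====
-- def parsePassports(inputs):
--     # Pass 1: group lines into blocks separated by blank ("\n") lines.
--     blocks = [[]]
--     for line in inputs:
--         if line == "\n":
--             blocks.append([])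
--         else:
--             blocks[-1].append(line)
--     # Pass 2: parse each block into a dict.
--     def parse(block):
--         d = {}
--         for line in block:
--             for t in line.split(" "):
--                 d[t.split(":")[0]] = t.split(":")[1].strip()
--         return d
--     return [parse(block) for block in blocks]
-- ===== Notes on version B (the rewrite author's own statement) =====
-- stated objective: alternative
-- what changed: Single stateful loop carrying a mutable current dict replaced by two passes: first group the lines into blocks at blank lines, then map a pure parse function over the blocks.
import Mathlib
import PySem

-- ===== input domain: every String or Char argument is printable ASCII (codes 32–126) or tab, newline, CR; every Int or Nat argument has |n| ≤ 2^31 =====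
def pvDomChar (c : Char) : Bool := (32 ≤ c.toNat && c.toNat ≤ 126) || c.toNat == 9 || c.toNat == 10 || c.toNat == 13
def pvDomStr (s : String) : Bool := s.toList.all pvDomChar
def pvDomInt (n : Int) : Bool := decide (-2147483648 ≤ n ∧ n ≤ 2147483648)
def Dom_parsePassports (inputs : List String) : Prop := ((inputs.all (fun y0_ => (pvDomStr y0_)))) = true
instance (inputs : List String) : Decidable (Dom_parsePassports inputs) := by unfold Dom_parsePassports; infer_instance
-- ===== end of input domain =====

-- B replaces A's single stateful loop (mutable `current` dict, flushed at blank lines) by two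
-- passes: group lines into blocks, then map a pure per-block parser over the blocks (objective:
-- alternative decomposition, same cost).

-- pvSplit s sep = s.split(sep) for sep ≠ "" (split? is none only for sep = ""; both ports use " " and ":")
def pvSplit (s sep : String) : List String := (PySem.Str.split? s sep).getD []

-- ===== PORT A =====
-- one stateful fold over the lines; state = (finished passports, current dict)
def parsePassports (inputs : List String) : List (List (String × String)) :=
  let st := inputs.foldl
    (fun (st : List (PySem.Dict String String) × PySem.Dict String String) line =>
      if line = "\n" then (st.1 ++ [st.2], PySem.Dict.empty)
      else (st.1, (pvSplit line " ").foldl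
        (fun cur param =>
          cur.insert ((PySem.List.pyGet? (pvSplit param ":") 0).getD "")
            (PySem.Str.strip ((PySem.List.pyGet? (pvSplit param ":") 1).getD ""))) st.2))
    ([], PySem.Dict.empty)
  (st.1 ++ [st.2]).map (fun d => d.items)

-- ===== PORT B =====
-- pass 2 helper: parse one block of lines into a dict
def pvParseBlock (block : List String) : PySem.Dict String String :=
  block.foldl (fun d line =>
    (pvSplit line " ").foldl
      (fun d t =>
        d.insert ((PySem.List.pyGet? (pvSplit t ":") 0).getD "")
          (PySem.Str.strip ((PySem.List.pyGet? (pvSplit t ":") 1).getD ""))) d)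
    PySem.Dict.empty

def parsePassports_alt (inputs : List String) : List (List (String × String)) :=
  let blocks := inputs.foldl
    (fun (blocks : List (List String)) line =>
      if line = "\n" then blocks ++ [[]]
      else blocks.dropLast ++ [blocks.getLastD [] ++ [line]])
    [[]]
  blocks.map (fun b => (pvParseBlock b).items)

-- ===== PRECONDITION & SPEC =====
-- Pre_ excludes exactly the inputs on which the Python A raises IndexError: a non-blank line
-- containing a space-separated token without a ':' (param.split(":")[1] fails there; B raises too).
def Pre_parsePassports (inputs : List String) : Prop :=
  ∀ line ∈ inputs, line = "\n" ∨
    ∀ t ∈ pvSplit line " ", 2 ≤ (pvSplit t ":").length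
instance (inputs : List String) : Decidable (Pre_parsePassports inputs) := by unfold Pre_parsePassports; infer_instance

def pvWitness_parsePassports : List String := ["ecl:gry pid:860033327\n", "\n", "hcl:#fffffd\n"]

def Spec_parsePassports (inputs : List String) (out : List (List (String × String))) : Prop := out = parsePassports_alt inputs
instance (inputs : List String) (out : List (List (String × String))) : Decidable (Spec_parsePassports inputs out) := by unfold Spec_parsePassports; infer_instance

-- ===== CLAIM (what is proved, stated in full; the proofs are below) =====
def Claim_equal_parsePassports : Prop := ∀ (inputs : List String), Dom_parsePassports inputs → Pre_parsePassports inputs → Spec_parsePassports inputs (parsePassports inputs)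

-- ===== LEMMAS AND PROOFS =====

-- A's fold step
def pvStepA (st : List (PySem.Dict String String) × PySem.Dict String String) (line : String) :
    List (PySem.Dict String String) × PySem.Dict String String :=
  if line = "\n" then (st.1 ++ [st.2], PySem.Dict.empty)
  else (st.1, (pvSplit line " ").foldl
    (fun cur param =>
      cur.insert ((PySem.List.pyGet? (pvSplit param ":") 0).getD "")
        (PySem.Str.strip ((PySem.List.pyGet? (pvSplit param ":") 1).getD ""))) st.2)

-- B's fold step
def pvStepB (blocks : List (List String)) (line : String) : List (List String) :=
  if line = "\n" then blocks ++ [[]]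
  else blocks.dropLast ++ [blocks.getLastD [] ++ [line]]

lemma pvParseBlock_append_singleton (block : List String) (line : String) :
    pvParseBlock (block ++ [line]) =
      (pvSplit line " ").foldl
        (fun d t =>
          d.insert ((PySem.List.pyGet? (pvSplit t ":") 0).getD "")
            (PySem.Str.strip ((PySem.List.pyGet? (pvSplit t ":") 1).getD ""))) (pvParseBlock block) := by
  simp [pvParseBlock, List.foldl_append]

-- main invariant: A's fold state is (map parse of finished blocks, parse of the current block)
lemma pv_main (inputs : List String) : ∀ (done : List (List String)) (cur : List String),
    inputs.foldl pvStepA (done.map pvParseBlock, pvParseBlock cur) =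
      ((inputs.foldl pvStepB (done ++ [cur])).dropLast.map pvParseBlock,
       pvParseBlock ((inputs.foldl pvStepB (done ++ [cur])).getLastD [])) := by
  induction inputs with
  | nil =>
      intro done cur
      simp
  | cons line rest ih =>
      intro done cur
      by_cases h : line = "\n"
      · have hA : pvStepA (done.map pvParseBlock, pvParseBlock cur) line =
            ((done ++ [cur]).map pvParseBlock, pvParseBlock []) := by
          simp [pvStepA, h, pvParseBlock]
        have hB : pvStepB (done ++ [cur]) line = (done ++ [cur]) ++ [[]] := by
          simp [pvStepB, h]
        simp only [List.foldl_cons, hA, hB]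
        exact ih (done ++ [cur]) []
      · have hA : pvStepA (done.map pvParseBlock, pvParseBlock cur) line =
            (done.map pvParseBlock, pvParseBlock (cur ++ [line])) := by
          simp [pvStepA, h, pvParseBlock_append_singleton]
        have hB : pvStepB (done ++ [cur]) line = done ++ [cur ++ [line]] := by
          simp [pvStepB, h]
        simp only [List.foldl_cons, hA, hB]
        exact ih done (cur ++ [line])
  
-- B's fold never empties the block list
lemma pv_foldB_ne_nil (inputs : List String) : ∀ (blocks : List (List String)), blocks ≠ [] →
    inputs.foldl pvStepB blocks ≠ [] := by
  induction inputs with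
  | nil => intro blocks h; simpa using h
  | cons line rest ih =>
      intro blocks h
      apply ih
      by_cases hl : line = "\n" <;> simp [pvStepB, hl]

lemma pv_dropLast_getLastD {α : Type} (l : List α) (h : l ≠ []) (d : α) :
    l.dropLast ++ [l.getLastD d] = l := by
  rcases List.eq_nil_or_concat l with rfl | ⟨l', a, rfl⟩
  · exact absurd rfl h
  · simp

-- ===== VERDICT (by name: the statement is the Claim_ definition above) =====
theorem parsePassports_spec : Claim_equal_parsePassports := by
  intro inputs _ _
  unfold Spec_parsePassports parsePassports parsePassports_alt
  have h0 : (([], PySem.Dict.empty) : List (PySem.Dict String String) × PySem.Dict String String)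
      = (([] : List (List String)).map pvParseBlock, pvParseBlock []) := rfl
  have hA : inputs.foldl (fun (st : List (PySem.Dict String String) × PySem.Dict String String) line =>
      if line = "\n" then (st.1 ++ [st.2], PySem.Dict.empty)
      else (st.1, (pvSplit line " ").foldl
        (fun cur param =>
          cur.insert ((PySem.List.pyGet? (pvSplit param ":") 0).getD "")
            (PySem.Str.strip ((PySem.List.pyGet? (pvSplit param ":") 1).getD ""))) st.2))
      ([], PySem.Dict.empty) = inputs.foldl pvStepA (([] : List (List String)).map pvParseBlock, pvParseBlock []) := rfl
  have hB : inputs.foldl (fun (blocks : List (List String)) line =>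
      if line = "\n" then blocks ++ [[]]
      else blocks.dropLast ++ [blocks.getLastD [] ++ [line]]) [[]]
      = inputs.foldl pvStepB (([] : List (List String)) ++ [[]]) := rfl
  simp only [hA, hB, pv_main inputs [] []]
  set b' := inputs.foldl pvStepB (([] : List (List String)) ++ [[]]) with hb'
  have hne : b' ≠ [] := pv_foldB_ne_nil inputs _ (by simp)
  have : b'.dropLast.map pvParseBlock ++ [pvParseBlock (b'.getLastD [])]
      = b'.map pvParseBlock := by
    simpa using congrArg (List.map pvParseBlock) (pv_dropLast_getLastD b' hne [])
  simp only [this, List.map_map]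
  rfl
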